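-- pv_equiv track=rewrite | github.com/shaurya30-ops/meta-action-injection-agent | app/backend/content_extraction/extractor_logic.py | email_to_tts
-- ===== SOURCE A (Python) =====
-- DIGIT_TO_WORD = {
--     "0": "zero",
--     "1": "one",
--     "2": "two",
--     "3": "three",
--     "4": "four",
--     "5": "five",
--     "6": "six",
--     "7": "seven",
--     "8": "eight",
--     "9": "nine",
-- }
--
-- def email_to_tts(email: str) -> str:
--     if not email:
--         return ""
--
--     parts: list[str] = []
--     current: list[str] = []
--     for char in email:
--         if char in "@._-":
--             if current:
--                 parts.append("".join(current))
--                 current = []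
--             parts.append(char)
--             continue
--         if char.isdigit():
--             if current:
--                 parts.append("".join(current))
--                 current = []
--             parts.append(char)
--             continue
--         current.append(char)
--
--     if current:
--         parts.append("".join(current))
--
--     spoken: list[str] = []
--     for part in parts:
--         if part == "@":
--             spoken.append("at the rate")
--         elif part == ".":
--             spoken.append("dot")
--         elif part == "_":
--             spoken.append("underscore")
--         elif part == "-":
--             spoken.append("dash")
--         elif part.isdigit():
--             spoken.append(DIGIT_TO_WORD[part])
--         else:
--             spoken.append(part.lower())
--     return " ".join(spoken)
-- ===== SOURCE B (Python) =====
-- _SPOKEN = {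
--     "@": "at the rate", ".": "dot", "_": "underscore", "-": "dash",
--     "0": "zero", "1": "one", "2": "two", "3": "three", "4": "four",
--     "5": "five", "6": "six", "7": "seven", "8": "eight", "9": "nine",
-- }
--
--
-- def email_to_tts(email: str) -> str:
--     spoken: list[str] = []
--     i, n = 0, len(email)
--     while i < n:
--         word = _SPOKEN.get(email[i])
--         if word is not None:
--             spoken.append(word)
--             i += 1
--         else:
--             j = i + 1
--             while j < n and email[j] not in _SPOKEN:
--                 j += 1
--             spoken.append(email[i:j].lower())
--             i = j
--     return " ".join(spoken)
-- ===== Notes on version B (the rewrite author's own statement) =====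
-- stated objective: simpler
-- what changed: Replaces A's two-pass accumulator/flush state machine (build a parts list, then map each part through an if/elif chain) with a single index-based scan that maps each special/digit character through one lookup table and slices whole letter runs directly into the output.
import Mathlib
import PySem

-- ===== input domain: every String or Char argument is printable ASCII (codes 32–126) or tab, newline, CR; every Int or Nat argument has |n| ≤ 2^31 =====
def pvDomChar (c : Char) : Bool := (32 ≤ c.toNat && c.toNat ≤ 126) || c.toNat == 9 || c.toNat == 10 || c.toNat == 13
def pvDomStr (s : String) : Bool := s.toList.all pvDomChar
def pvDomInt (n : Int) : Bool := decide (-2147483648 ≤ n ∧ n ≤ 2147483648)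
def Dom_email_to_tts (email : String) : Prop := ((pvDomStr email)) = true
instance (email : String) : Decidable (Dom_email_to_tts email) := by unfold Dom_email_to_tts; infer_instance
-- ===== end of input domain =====

-- B replaces A's two-pass accumulator/flush state machine with a single scan
-- using one lookup table and run slicing (objective: simpler; same cost).


-- ===== PORT A =====
-- Python strs are handled as their character lists ("".join(current) ↔ the list itself)
def DIGIT_TO_WORD : PySem.Dict (List Char) (List Char) :=
  PySem.Dict.ofList [("0".toList, "zero".toList), ("1".toList, "one".toList),
    ("2".toList, "two".toList), ("3".toList, "three".toList), ("4".toList, "four".toList),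
    ("5".toList, "five".toList), ("6".toList, "six".toList), ("7".toList, "seven".toList),
    ("8".toList, "eight".toList), ("9".toList, "nine".toList)]

-- one iteration of A's first loop: state = (parts, current)
def pvAStep (st : List (List Char) × List Char) (c : Char) : List (List Char) × List Char :=
  if "@._-".toList.contains c then
    ((if st.2 ≠ [] then st.1 ++ [st.2] else st.1) ++ [[c]], [])
  else if PySem.Chars.isdigit c then
    ((if st.2 ≠ [] then st.1 ++ [st.2] else st.1) ++ [[c]], [])
  else (st.1, st.2 ++ [c])

-- A's second loop body (the if/elif chain over one part); DIGIT_TO_WORD[part]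
-- is ported with getD: a missing key is unreachable (digit parts are single digits)
def pvASpoken (p : List Char) : List Char :=
  if p = "@".toList then "at the rate".toList
  else if p = ".".toList then "dot".toList
  else if p = "_".toList then "underscore".toList
  else if p = "-".toList then "dash".toList
  else if PySem.Chars.strIsdigit p then DIGIT_TO_WORD.getD p []
  else PySem.Chars.lower p

def email_to_tts (email : String) : String :=
  if email = "" then "" else
  let st := email.toList.foldl pvAStep ([], [])
  let parts := if st.2 ≠ [] then st.1 ++ [st.2] else st.1
  String.ofList (PySem.Chars.join " ".toList (parts.map pvASpoken))

-- ===== PORT B =====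
def pvSPOKEN : PySem.Dict Char (List Char) :=
  PySem.Dict.ofList [('@', "at the rate".toList), ('.', "dot".toList),
    ('_', "underscore".toList), ('-', "dash".toList),
    ('0', "zero".toList), ('1', "one".toList), ('2', "two".toList), ('3', "three".toList),
    ('4', "four".toList), ('5', "five".toList), ('6', "six".toList), ('7', "seven".toList),
    ('8', "eight".toList), ('9', "nine".toList)]

-- B's outer while loop over the suffix email[i:]; the inner while that advances
-- j over characters not in the table is the takeWhile, and i = j is the drop.
def pvBTok : List Char → List (List Char)
  | [] => []
  | c :: rest =>
    match pvSPOKEN.get? c with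
    | some w => w :: pvBTok rest
    | none =>
      let run := rest.takeWhile (fun d => (pvSPOKEN.get? d).isNone)
      PySem.Chars.lower (c :: run) :: pvBTok (rest.drop run.length)
termination_by l => l.length
decreasing_by
  · simp only [List.length_cons]; omega
  · have h1 : (List.drop (List.takeWhile (fun d => (pvSPOKEN.get? d).isNone) rest).length
        rest).length ≤ rest.length := by
      rw [List.length_drop]; omega
    simp only [List.length_cons]; omega

def email_to_tts_alt (email : String) : String :=
  String.ofList (PySem.Chars.join " ".toList (pvBTok email.toList))

-- ===== PRECONDITION & SPEC =====
def Spec_email_to_tts (email : String) (out : String) : Prop := out = email_to_tts_alt email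
instance (email : String) (out : String) : Decidable (Spec_email_to_tts email out) := by unfold Spec_email_to_tts; infer_instance

-- ===== CLAIM (what is proved, stated in full; the proofs are below) =====
def Claim_equal_email_to_tts : Prop := ∀ (email : String), Dom_email_to_tts email → Spec_email_to_tts email (email_to_tts email)

-- ===== LEMMAS AND PROOFS =====

-- A's single-character classification (the two flush branches)
def pvIsTokA (c : Char) : Bool := "@._-".toList.contains c || PySem.Chars.isdigit c

-- proof-side characterisation of A's first loop, as a recursion over the input
def pvParts : List Char → List Char → List (List Char)
  | cur, [] => if cur ≠ [] then [cur] else []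
  | cur, c :: r =>
    if pvIsTokA c then (if cur ≠ [] then [cur] else []) ++ [c] :: pvParts [] r
    else pvParts (cur ++ [c]) r

lemma pv_digit_cases (c : Char) (h : PySem.Chars.isdigit c = true) :
    c ∈ ['0','1','2','3','4','5','6','7','8','9'] := by
  simp only [PySem.Chars.isdigit, Bool.and_eq_true, decide_eq_true_eq, Char.le_def] at h
  obtain ⟨h1, h2⟩ := h
  rw [UInt32.le_iff_toNat_le] at h1 h2
  rw [show ('0').val.toNat = 48 from rfl] at h1
  rw [show ('9').val.toNat = 57 from rfl] at h2
  have h3 : c.val.toNat = 48 ∨ c.val.toNat = 49 ∨ c.val.toNat = 50 ∨ c.val.toNat = 51 ∨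
      c.val.toNat = 52 ∨ c.val.toNat = 53 ∨ c.val.toNat = 54 ∨ c.val.toNat = 55 ∨
      c.val.toNat = 56 ∨ c.val.toNat = 57 := by omega
  rcases h3 with h|h|h|h|h|h|h|h|h|h
  · simp [Char.ext (UInt32.toNat_inj.mp (h.trans (show (48:Nat) = ('0').val.toNat from rfl)))]
  · simp [Char.ext (UInt32.toNat_inj.mp (h.trans (show (49:Nat) = ('1').val.toNat from rfl)))]
  · simp [Char.ext (UInt32.toNat_inj.mp (h.trans (show (50:Nat) = ('2').val.toNat from rfl)))]
  · simp [Char.ext (UInt32.toNat_inj.mp (h.trans (show (51:Nat) = ('3').val.toNat from rfl)))]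
  · simp [Char.ext (UInt32.toNat_inj.mp (h.trans (show (52:Nat) = ('4').val.toNat from rfl)))]
  · simp [Char.ext (UInt32.toNat_inj.mp (h.trans (show (53:Nat) = ('5').val.toNat from rfl)))]
  · simp [Char.ext (UInt32.toNat_inj.mp (h.trans (show (54:Nat) = ('6').val.toNat from rfl)))]
  · simp [Char.ext (UInt32.toNat_inj.mp (h.trans (show (55:Nat) = ('7').val.toNat from rfl)))]
  · simp [Char.ext (UInt32.toNat_inj.mp (h.trans (show (56:Nat) = ('8').val.toNat from rfl)))]
  · simp [Char.ext (UInt32.toNat_inj.mp (h.trans (show (57:Nat) = ('9').val.toNat from rfl)))]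

-- the 14 characters of B's table
lemma pvTokA_mem (c : Char) (h : pvIsTokA c = true) :
    c ∈ ['@', '.', '_', '-', '0', '1', '2', '3', '4', '5', '6', '7', '8', '9'] := by
  simp only [pvIsTokA, Bool.or_eq_true] at h
  rcases h with h | h
  · have hm : c ∈ ['@', '.', '_', '-'] := by simpa using h
    simp only [List.mem_cons, List.not_mem_nil, or_false] at hm ⊢
    tauto
  · have hm := pv_digit_cases c h
    simp only [List.mem_cons, List.not_mem_nil, or_false] at hm ⊢
    tauto

lemma pvSPOKEN_mk : pvSPOKEN = PySem.Dict.mk [('@', "at the rate".toList), ('.', "dot".toList),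
    ('_', "underscore".toList), ('-', "dash".toList),
    ('0', "zero".toList), ('1', "one".toList), ('2', "two".toList), ('3', "three".toList),
    ('4', "four".toList), ('5', "five".toList), ('6', "six".toList), ('7', "seven".toList),
    ('8', "eight".toList), ('9', "nine".toList)] := rfl

-- classification agreement: B's table has a key exactly on A's flush characters
lemma pvTok_eq (c : Char) : (pvSPOKEN.get? c).isSome = pvIsTokA c := by
  by_cases hmem : c ∈ ['@', '.', '_', '-', '0', '1', '2', '3', '4', '5', '6', '7', '8', '9']
  · fin_cases hmem <;> decide
  · simp only [List.mem_cons, List.not_mem_nil, or_false, not_or] at hmem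
    obtain ⟨m1, m2, m3, m4, m5, m6, m7, m8, m9, m10, m11, m12, m13, m14⟩ := hmem
    have htok : pvIsTokA c = false := by
      cases htok : pvIsTokA c
      · rfl
      · exfalso
        have := pvTokA_mem c htok
        simp only [List.mem_cons, List.not_mem_nil, or_false] at this
        tauto
    rw [htok, pvSPOKEN_mk]
    simp only [PySem.Dict.get?_mk_cons]
    rw [if_neg (fun hh => m1 (beq_iff_eq.mp hh).symm),
        if_neg (fun hh => m2 (beq_iff_eq.mp hh).symm),
        if_neg (fun hh => m3 (beq_iff_eq.mp hh).symm),
        if_neg (fun hh => m4 (beq_iff_eq.mp hh).symm),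
        if_neg (fun hh => m5 (beq_iff_eq.mp hh).symm),
        if_neg (fun hh => m6 (beq_iff_eq.mp hh).symm),
        if_neg (fun hh => m7 (beq_iff_eq.mp hh).symm),
        if_neg (fun hh => m8 (beq_iff_eq.mp hh).symm),
        if_neg (fun hh => m9 (beq_iff_eq.mp hh).symm),
        if_neg (fun hh => m10 (beq_iff_eq.mp hh).symm),
        if_neg (fun hh => m11 (beq_iff_eq.mp hh).symm),
        if_neg (fun hh => m12 (beq_iff_eq.mp hh).symm),
        if_neg (fun hh => m13 (beq_iff_eq.mp hh).symm),
        if_neg (fun hh => m14 (beq_iff_eq.mp hh).symm)]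
    rfl

-- on a token character the two spoken words agree
lemma pvSpoken_tok (c : Char) (w : List Char) (h : pvSPOKEN.get? c = some w) :
    pvASpoken [c] = w := by
  have htok : pvIsTokA c = true := by rw [← pvTok_eq, h]; rfl
  have hmem := pvTokA_mem c htok
  fin_cases hmem <;> injection h with h2

-- a word part (headed by a non-token character) is just lowered by A
lemma pvSpoken_word (c : Char) (w : List Char) (h : pvIsTokA c = false) :
    pvASpoken (c :: w) = PySem.Chars.lower (c :: w) := by
  simp only [pvIsTokA, Bool.or_eq_false_iff] at h
  obtain ⟨hc, hd⟩ := h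
  have n1 : c :: w ≠ "@".toList := by
    intro he; rw [show "@".toList = ['@'] from rfl] at he
    injection he with h1 _; subst h1; exact absurd hc (by decide)
  have n2 : c :: w ≠ ".".toList := by
    intro he; rw [show ".".toList = ['.'] from rfl] at he
    injection he with h1 _; subst h1; exact absurd hc (by decide)
  have n3 : c :: w ≠ "_".toList := by
    intro he; rw [show "_".toList = ['_'] from rfl] at he
    injection he with h1 _; subst h1; exact absurd hc (by decide)
  have n4 : c :: w ≠ "-".toList := by
    intro he; rw [show "-".toList = ['-'] from rfl] at he
    injection he with h1 _; subst h1; exact absurd hc (by decide)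
  have n5 : PySem.Chars.strIsdigit (c :: w) = false := by
    simp [PySem.Chars.strIsdigit, hd]
  rw [pvASpoken, if_neg n1, if_neg n2, if_neg n3, if_neg n4, if_neg (by simp [n5])]

lemma pvA_fold (l : List Char) : ∀ parts cur,
    (let st := l.foldl pvAStep (parts, cur)
     if st.2 ≠ [] then st.1 ++ [st.2] else st.1) = parts ++ pvParts cur l := by
  induction l with
  | nil => intro parts cur; by_cases h : cur = [] <;> simp [pvParts, h]
  | cons c r ih =>
    intro parts cur
    by_cases h : pvIsTokA c
    · have hstep : pvAStep (parts, cur) c =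
          ((if cur ≠ [] then parts ++ [cur] else parts) ++ [[c]], []) := by
        simp only [pvIsTokA, Bool.or_eq_true] at h
        rcases h with h | h
        · simp only [pvAStep, h, if_pos]
        · by_cases hc : "@._-".toList.contains c = true
          · simp only [pvAStep, hc, if_pos]
          · simp only [pvAStep, hc, h, if_pos, Bool.false_eq_true, if_false]
      simp only [List.foldl_cons, hstep, ih, pvParts, h, if_pos]
      by_cases hc : cur = [] <;> simp [hc]
    · have h' : pvIsTokA c = false := by simpa using h
      have hstep : pvAStep (parts, cur) c = (parts, cur ++ [c]) := by
        simp only [pvIsTokA, Bool.or_eq_false_iff] at h'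
        simp only [pvAStep, h'.1, h'.2, Bool.false_eq_true, if_false]
      simp only [List.foldl_cons, hstep, ih, pvParts, h', Bool.false_eq_true, if_false]

-- A's pending-word recursion in run/slice form (B's inner while)
lemma pvParts_run (r : List Char) : ∀ cur, cur ≠ [] →
    pvParts cur r = (cur ++ r.takeWhile (fun d => !pvIsTokA d)) ::
      pvParts [] (r.drop (r.takeWhile (fun d => !pvIsTokA d)).length) := by
  induction r with
  | nil => intro cur hc; simp [pvParts, hc]
  | cons d t ih =>
    intro cur hc
    by_cases h : pvIsTokA d
    · simp [pvParts, h, hc]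
    · have h' : pvIsTokA d = false := by simpa using h
      rw [pvParts, if_neg (by simp [h']), ih _ (by simp)]
      simp [h', List.append_assoc]

lemma pvMain (l : List Char) : pvBTok l = (pvParts [] l).map pvASpoken := by
  induction l using pvBTok.induct with
  | case1 => simp [pvBTok, pvParts]
  | case2 c rest w hw ih =>
    have htok : pvIsTokA c = true := by rw [← pvTok_eq, hw]; rfl
    rw [pvBTok, hw]
    simp [pvParts, htok, ih, pvSpoken_tok c w hw]
  | case3 c rest hw run ih =>
    have htok : pvIsTokA c = false := by rw [← pvTok_eq, hw]; rfl
    have hP : (fun d => (pvSPOKEN.get? d).isNone) = (fun d => !pvIsTokA d) := by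
      funext d; rw [← pvTok_eq]; cases (pvSPOKEN.get? d) <;> rfl
    rw [pvBTok, hw]
    show PySem.Chars.lower (c :: run) :: pvBTok (rest.drop run.length) = _
    rw [show pvParts [] (c :: rest) = pvParts [c] rest by
          rw [pvParts, if_neg (by simp [htok]), List.nil_append]]
    rw [pvParts_run rest [c] (by simp)]
    simp only [List.map_cons, List.singleton_append]
    rw [pvSpoken_word c _ htok]
    have hrun : run = rest.takeWhile (fun d => !pvIsTokA d) := by
      rw [show run = rest.takeWhile (fun d => (pvSPOKEN.get? d).isNone) from rfl, hP]
    rw [← hrun, ← ih]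

theorem pv_eq_lists (l : List Char) :
    (let st := l.foldl pvAStep ([], [])
     if st.2 ≠ [] then st.1 ++ [st.2] else st.1).map pvASpoken = pvBTok l := by
  rw [pvA_fold l [] [], pvMain]; rfl

-- ===== VERDICT (by name: the statement is the Claim_ definition above) =====
theorem email_to_tts_spec : Claim_equal_email_to_tts := by
  intro email _
  unfold Spec_email_to_tts email_to_tts email_to_tts_alt
  by_cases h : email = ""
  · subst h
    rw [if_pos rfl, show "".toList = ([] : List Char) from by decide,
      show pvBTok [] = ([] : List (List Char)) from by simp [pvBTok]]
    rfl
  · simp only [h, if_false]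
    rw [← pv_eq_lists email.toList]
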